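-- pv_equiv track=rewrite | github.com/shriyans-h/ee1030-2025 | EE25BTECH11041/Assignments/matgeo/q13-5.13.66/b/code/figure.py | solve_part_b
-- ===== SOURCE A (Python) =====
-- def solve_part_b(p):
--     """
--     Solves part (b) by checking every matrix of the form [[a, b], [c, a]].
--
--     It counts matrices where:
--     1. The trace (2a) is not divisible by p.
--     2. The determinant (a^2 - bc) is divisible by p.
--
--     Args:
--         p: An odd prime number.
--
--     Returns:
--         The total count of such matrices.
--     """
--     count = 0
--     for a in range(p):
--         for b in range(p):
--             for c in range(p):
--                 # Trace condition: 2a != 0 mod p => a != 0 (since p is odd)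
--                 trace_is_not_zero = (a != 0)
--
--                 # Determinant condition: a^2 - bc == 0 mod p
--                 determinant_is_zero = (a * a - b * c) % p == 0
--
--                 if trace_is_not_zero and determinant_is_zero:
--                     count += 1
--     return count
-- ===== SOURCE B (Python) =====
-- def solve_part_b(p):
--     # Count products b*c mod p once (O(p^2)), then sum the table at a^2 mod p
--     # for each nonzero a, instead of A's O(p^3) triple loop.
--     cnt = {}
--     for b in range(p):
--         for c in range(p):
--             r = (b * c) % p
--             cnt[r] = cnt.get(r, 0) + 1
--     total = 0
--     for a in range(1, p):
--         total += cnt.get(a * a % p, 0)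
--     return total
-- ===== Notes on version B (the rewrite author's own statement) =====
-- stated objective: faster
-- what changed: Replaces the O(p^3) triple loop by a two-pass scheme: one O(p^2) pass builds a frequency table of b*c mod p, then one O(p) pass sums the table at a^2 mod p for each nonzero a.
import Mathlib
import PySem

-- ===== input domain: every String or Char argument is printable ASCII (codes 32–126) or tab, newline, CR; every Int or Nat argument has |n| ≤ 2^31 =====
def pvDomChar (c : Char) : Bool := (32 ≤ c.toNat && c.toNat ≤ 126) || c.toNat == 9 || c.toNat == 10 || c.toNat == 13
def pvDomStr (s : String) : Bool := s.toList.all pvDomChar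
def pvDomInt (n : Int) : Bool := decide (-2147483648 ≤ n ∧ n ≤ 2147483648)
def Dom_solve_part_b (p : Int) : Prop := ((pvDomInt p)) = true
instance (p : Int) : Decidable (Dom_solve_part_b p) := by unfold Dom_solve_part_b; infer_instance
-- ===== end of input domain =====

-- B replaces A's O(p^3) triple loop by a frequency table of b*c mod p built in one
-- O(p^2) pass, then a single O(p) pass summing the table at a^2 mod p for nonzero a.

-- ===== PORT A =====
def solve_part_b (p : Int) : Int :=
  (PySem.List.pyRange 0 p 1).foldl (fun count a =>
    (PySem.List.pyRange 0 p 1).foldl (fun count b =>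
      (PySem.List.pyRange 0 p 1).foldl (fun count c =>
        let trace_is_not_zero := a != 0
        let determinant_is_zero := PySem.Int.mod (a * a - b * c) p == 0
        if trace_is_not_zero && determinant_is_zero then count + 1 else count)
        count) count) 0

-- ===== PORT B =====
def solve_part_b_alt (p : Int) : Int :=
  let cnt : PySem.Dict Int Int :=
    (PySem.List.pyRange 0 p 1).foldl (fun d b =>
      (PySem.List.pyRange 0 p 1).foldl (fun d c =>
        d.insert (PySem.Int.mod (b * c) p) (d.getD (PySem.Int.mod (b * c) p) 0 + 1)) d)
      PySem.Dict.empty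
  (PySem.List.pyRange 1 p 1).foldl (fun total a =>
    total + cnt.getD (PySem.Int.mod (a * a) p) 0) 0

-- ===== PRECONDITION & SPEC =====
def Spec_solve_part_b (p : Int) (out : Int) : Prop := out = solve_part_b_alt p
instance (p : Int) (out : Int) : Decidable (Spec_solve_part_b p out) := by unfold Spec_solve_part_b; infer_instance

-- ===== CLAIM (what is proved, stated in full; the proofs are below) =====
def Claim_equal_solve_part_b : Prop := ∀ (p : Int), Dom_solve_part_b p → Spec_solve_part_b p (solve_part_b p)

-- ===== LEMMAS AND PROOFS =====

-- the multiset of residues b*c mod p over the double loop, as a list of keys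
def pvKeys (p : Int) : List Int :=
  (PySem.List.pyRange 0 p 1).flatMap (fun b =>
    (PySem.List.pyRange 0 p 1).map (fun c => PySem.Int.mod (b * c) p))

-- counting fold: adding 1 whenever f c hits the target counts the hits
theorem pv_foldl_if_count (l : List Int) (f : Int → Int) (t : Int) (acc : Int) :
    l.foldl (fun acc c => if f c == t then acc + 1 else acc) acc
      = acc + ((l.map f).count t : Int) := by
  induction l generalizing acc with
  | nil => simp
  | cons c l ih =>
    simp only [List.foldl_cons, List.map_cons, List.count_cons, ih]
    by_cases h : f c = t
    · simp [h]; omega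
    · simp [h]

-- occurrences in a flatMap, summed block by block
theorem pv_count_flatMap (bs : List Int) (g : Int → List Int) (t : Int) :
    (((bs.flatMap g).count t : Int)) = (bs.map (fun b => (((g b).count t : Int)))).sum := by
  induction bs with
  | nil => simp
  | cons b bs ih =>
    simp only [List.flatMap_cons, List.count_append, List.map_cons, List.sum_cons, ← ih]
    push_cast
    ring

-- a counting insert-loop over mapped keys, read back through getD
theorem pv_insert_count (l : List Int) (f : Int → Int) (d : PySem.Dict Int Int) (r : Int) :
    (l.foldl (fun d c => d.insert (f c) (d.getD (f c) 0 + 1)) d).getD r 0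
      = d.getD r 0 + ((l.map f).count r : Int) := by
  induction l generalizing d with
  | nil => simp
  | cons c l ih =>
    simp only [List.foldl_cons, List.map_cons, List.count_cons, ih,
      PySem.Dict.getD_insert]
    by_cases h : r = f c
    · simp [h]; ring
    · have h2 : ¬ f c = r := fun hh => h hh.symm
      simp [h, h2]

-- B's dict after the nested build loop: getD r 0 = number of occurrences of r
theorem pv_dict_count (p : Int) (bs : List Int) (d : PySem.Dict Int Int) (r : Int) :
    (bs.foldl (fun d b =>
        (PySem.List.pyRange 0 p 1).foldl (fun d c =>
          d.insert (PySem.Int.mod (b * c) p) (d.getD (PySem.Int.mod (b * c) p) 0 + 1)) d) d).getD r 0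
      = d.getD r 0 + ((bs.flatMap (fun b =>
          (PySem.List.pyRange 0 p 1).map (fun c => PySem.Int.mod (b * c) p))).count r : Int) := by
  induction bs generalizing d with
  | nil => simp
  | cons b bs ih =>
    simp only [List.foldl_cons, List.flatMap_cons, List.count_append, ih,
      pv_insert_count]
    push_cast
    ring

-- A's inner double loop for one a: it adds the count of a^2 mod p among the residues
theorem pv_inner (p : Int) (hp : 0 < p) (a : Int) (bs : List Int) (acc : Int) :
    bs.foldl (fun count b =>
      (PySem.List.pyRange 0 p 1).foldl (fun count c =>
        let trace_is_not_zero := a != 0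
        let determinant_is_zero := PySem.Int.mod (a * a - b * c) p == 0
        if trace_is_not_zero && determinant_is_zero then count + 1 else count)
        count) acc
      = acc + (if a = 0 then 0 else ((bs.flatMap (fun b =>
          (PySem.List.pyRange 0 p 1).map (fun c => PySem.Int.mod (b * c) p))).count
            (PySem.Int.mod (a * a) p) : Int)) := by
  by_cases ha : a = 0
  · subst ha
    simp
  · have hcond : ∀ b c : Int,
        ((a != 0) && (PySem.Int.mod (a * a - b * c) p == 0))
          = (PySem.Int.mod (b * c) p == PySem.Int.mod (a * a) p) := by
      intro b c
      have hm : ∀ x : Int, PySem.Int.mod x p = x % p :=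
        fun x => PySem.Int.mod_eq_emod_of_pos hp
      have hne : (a != 0) = true := by simp [ha]
      rw [hne, Bool.true_and, Bool.eq_iff_iff]
      simp only [beq_iff_eq, hm]
      rw [Int.emod_eq_emod_iff_emod_sub_eq_zero]
      constructor
      · intro h
        exact Int.emod_eq_zero_of_dvd (dvd_sub_comm.mp (Int.dvd_of_emod_eq_zero h))
      · intro h
        exact Int.emod_eq_zero_of_dvd (dvd_sub_comm.mp (Int.dvd_of_emod_eq_zero h))
    simp only [hcond, pv_foldl_if_count]
    rw [PySem.List.foldl_add]
    simp only [ha, if_false]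
    rw [pv_count_flatMap]

-- ===== VERDICT (by name: the statement is the Claim_ definition above) =====
theorem solve_part_b_spec : Claim_equal_solve_part_b := by
  intro p _
  unfold Spec_solve_part_b solve_part_b solve_part_b_alt
  by_cases hp : 0 < p
  · simp only [pv_inner p hp, pv_dict_count p]
    rw [PySem.List.foldl_add, PySem.List.foldl_add]
    rw [PySem.List.pyRange_one_cons hp]
    simp only [List.map_cons, List.sum_cons, PySem.Dict.getD_empty, zero_add, if_true]
    congr 1
    apply List.map_congr_left
    intro a hmem
    have h1 := (PySem.List.mem_pyRange_one.mp hmem).1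
    have ha : a ≠ 0 := by omega
    simp [ha]
  · rw [PySem.List.pyRange_one_eq_nil (by omega), PySem.List.pyRange_one_eq_nil (by omega)]
    simp
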